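-- pv_equiv track=rewrite | github.com/image-science-laboratory/aoki-codility | codility4-1.py | solution
-- ===== SOURCE A (Python) =====
-- def solution(X, A):
--     # write your code in Python 3.6
--     dict1 = {}
--     for i, j in enumerate(A):
--         if j not in dict1:
--             dict1[j] = 1
--         if len(dict1) == X:
--             return i
--     return -1
-- ===== SOURCE B (Python) =====
-- def solution(X, A):
--     first = {}
--     for i, v in reversed(list(enumerate(A))):
--         first[v] = i
--     idxs = sorted(first.values())
--     return idxs[X - 1] if 1 <= X <= len(idxs) else -1
-- ===== Notes on version B (the rewrite author's own statement) =====
-- stated objective: alternative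
-- what changed: Instead of A's forward scan that counts distinct values and early-exits, B scans the list in reverse unconditionally overwriting a value-to-index dict (so each value ends at its first index), then sorts the first-occurrence indices and selects the X-th smallest positionally.
import Mathlib
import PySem

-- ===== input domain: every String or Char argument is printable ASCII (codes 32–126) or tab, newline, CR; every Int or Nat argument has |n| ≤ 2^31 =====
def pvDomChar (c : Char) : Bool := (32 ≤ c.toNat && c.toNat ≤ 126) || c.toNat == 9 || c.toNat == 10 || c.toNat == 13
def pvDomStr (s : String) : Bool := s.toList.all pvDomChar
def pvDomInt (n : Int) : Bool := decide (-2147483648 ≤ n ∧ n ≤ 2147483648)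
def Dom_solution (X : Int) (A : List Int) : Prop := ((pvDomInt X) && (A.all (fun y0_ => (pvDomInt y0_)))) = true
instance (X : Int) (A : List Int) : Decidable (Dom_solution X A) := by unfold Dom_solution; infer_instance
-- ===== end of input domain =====

-- B replaces A's early-exit distinct-count loop by a reverse scan with unconditional dict overwrite (leaving each value's first index) followed by sorting the first-occurrence indices and positional selection; alternative decomposition, similar cost.


-- ===== PORT A =====
-- A's loop: for i, j in enumerate(A): if j not in dict1: dict1[j] = 1; if len(dict1) == X: return i
def solGoA (X : Int) : List (Int × Int) → PySem.Dict Int Int → Int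
  | [], _ => -1
  | (i, j) :: rest, d =>
    let d' := if d.contains j then d else d.insert j 1
    if (d'.size : Int) = X then i else solGoA X rest d'

def solution (X : Int) (A : List Int) : Int :=
  solGoA X (PySem.List.enumerate A 0) PySem.Dict.empty

-- ===== PORT B =====
-- B's loop body: first[v] = i, iterating reversed(list(enumerate(A)))
def revStep (d : PySem.Dict Int Int) (p : Int × Int) : PySem.Dict Int Int :=
  d.insert p.2 p.1

def solution_alt (X : Int) (A : List Int) : Int :=
  let first := (PySem.List.enumerate A 0).reverse.foldl revStep PySem.Dict.empty
  let idxs := PySem.List.sorted first.values (fun x => x) false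
  -- idxs[X - 1]: the guard 1 ≤ X ≤ len(idxs) makes the index in range, so the getD default is never used
  if 1 ≤ X ∧ X ≤ (idxs.length : Int) then (PySem.List.pyGet? idxs (X - 1)).getD (-1) else -1

-- ===== PRECONDITION & SPEC =====
def Spec_solution (X : Int) (A : List Int) (out : Int) : Prop := out = solution_alt X A
instance (X : Int) (A : List Int) (out : Int) : Decidable (Spec_solution X A out) := by unfold Spec_solution; infer_instance

-- ===== CLAIM (what is proved, stated in full; the proofs are below) =====
def Claim_equal_solution : Prop := ∀ (X : Int) (A : List Int), Dom_solution X A → Spec_solution X A (solution X A)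

-- ===== LEMMAS AND PROOFS =====

-- the forward first-occurrence step, proof-side intermediary between A's loop and B's dict
def bStep (d : PySem.Dict Int Int) (p : Int × Int) : PySem.Dict Int Int :=
  if d.contains p.2 then d else d.insert p.2 p.1

-- first occurrence of key k in an (index, value) list
def firstOcc (l : List (Int × Int)) (k : Int) : Option Int :=
  (l.find? (fun p => p.2 == k)).map (·.1)

theorem values_length_eq_size (d : PySem.Dict Int Int) : d.values.length = d.size := by
  simp [PySem.Dict.values, PySem.Dict.size]

theorem values_bStep_grow (l : List (Int × Int)) (d : PySem.Dict Int Int) :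
    ∃ t, (l.foldl bStep d).values = d.values ++ t := by
  induction l generalizing d with
  | nil => exact ⟨[], by simp⟩
  | cons p rest ih =>
    simp only [List.foldl_cons, bStep]
    by_cases hc : d.contains p.2
    · simp only [hc, if_true]; exact ih d
    · simp only [hc, Bool.false_eq_true, if_false]
      obtain ⟨t, ht⟩ := ih (d.insert p.2 p.1)
      refine ⟨p.1 :: t, ?_⟩
      rw [ht]
      have : (d.insert p.2 p.1).values = d.values ++ [p.1] := by
        simp [PySem.Dict.values,
          PySem.Dict.items_insert_of_not_contains d p.1 (by simpa using hc)]
      rw [this]; simp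

theorem solGoA_neg (X : Int) (hX : X ≤ 0) :
    ∀ (l : List (Int × Int)) (d : PySem.Dict Int Int),
      (X ≠ (d.size : Int) ∨ d = PySem.Dict.empty) → solGoA X l d = -1 := by
  intro l
  induction l with
  | nil => intro d _; rfl
  | cons p rest ih =>
    intro d hd
    obtain ⟨i, j⟩ := p
    simp only [solGoA]
    by_cases hc : d.contains j
    · have hne : (d.size : Int) ≠ X := by
        rcases hd with h | h
        · exact fun he => h he.symm
        · subst h; simp [PySem.Dict.contains_empty] at hc
      simp only [hc, if_true, hne, if_false]
      apply ih
      rcases hd with h | h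
      · exact Or.inl h
      · exact Or.inr h
    · have hsz : (d.insert j 1).size = d.size + 1 := by
        simp [PySem.Dict.size_insert, hc]
      have hne : ((d.insert j 1).size : Int) ≠ X := by
        rw [hsz]; push_cast; omega
      simp only [hc, Bool.false_eq_true, if_false, hne]
      apply ih
      left
      rw [hsz]; push_cast; omega

theorem contains_congr_keys (d1 d2 : PySem.Dict Int Int) (h : d1.keys = d2.keys) (j : Int) :
    d1.contains j = d2.contains j := by
  rw [PySem.Dict.contains_eq_decide_mem_keys, PySem.Dict.contains_eq_decide_mem_keys, h]

theorem size_eq_of_keys_eq (d1 d2 : PySem.Dict Int Int) (h : d1.keys = d2.keys) :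
    d1.size = d2.size := by
  have := congrArg List.length h
  simpa [PySem.Dict.keys, PySem.Dict.size] using this

-- A's loop agrees with positional selection from the forward first-occurrence values list
theorem solGoA_main (X : Int) :
    ∀ (l : List (Int × Int)) (d1 d2 : PySem.Dict Int Int),
      d1.keys = d2.keys → (d2.size : Int) < X →
      solGoA X l d1 =
        (if X ≤ (((l.foldl bStep d2).values.length : Nat) : Int)
         then (PySem.List.pyGet? (l.foldl bStep d2).values (X - 1)).getD (-1)
         else -1) := by
  intro l
  induction l with
  | nil =>
    intro d1 d2 hk hlt
    have : ¬ X ≤ ((d2.values.length : Nat) : Int) := by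
      rw [values_length_eq_size]; omega
    simp [solGoA, this]
  | cons p rest ih =>
    intro d1 d2 hk hlt
    obtain ⟨i, j⟩ := p
    have hcc : d1.contains j = d2.contains j := contains_congr_keys d1 d2 hk j
    have hss : d1.size = d2.size := size_eq_of_keys_eq d1 d2 hk
    simp only [solGoA, List.foldl_cons, bStep]
    by_cases hc : d2.contains j
    · have hne : (d1.size : Int) ≠ X := by rw [hss]; omega
      simp only [hcc, hc, if_true, hne, if_false]
      exact ih d1 d2 hk hlt
    · have hk' : (d1.insert j 1).keys = (d2.insert j i).keys := by
        rw [PySem.Dict.keys_insert_of_not_contains d1 1 (by rw [hcc]; simpa using hc),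
            PySem.Dict.keys_insert_of_not_contains d2 i (by simpa using hc), hk]
      have hsz2 : (d2.insert j i).size = d2.size + 1 := by
        simp [PySem.Dict.size_insert, hc]
      have hsz1 : ((d1.insert j 1).size : Int) = (d2.size : Int) + 1 := by
        have := size_eq_of_keys_eq _ _ hk'
        rw [this, hsz2]; push_cast; ring
      simp only [hcc, hc, Bool.false_eq_true, if_false]
      by_cases hX : (d2.size : Int) + 1 = X
      · rw [if_pos (by rw [hsz1]; exact hX)]
        obtain ⟨t, ht⟩ := values_bStep_grow rest (d2.insert j i)
        have hv2 : (d2.insert j i).values = d2.values ++ [i] := by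
          simp [PySem.Dict.values,
            PySem.Dict.items_insert_of_not_contains d2 i (by simpa using hc)]
        have hlen2 : d2.values.length = d2.size := values_length_eq_size d2
        have hle : X ≤ (((rest.foldl bStep (d2.insert j i)).values.length : Nat) : Int) := by
          rw [ht, hv2]; simp; omega
        rw [if_pos hle]
        have hidx : X - 1 = ((d2.values.length : Nat) : Int) := by rw [hlen2]; omega
        rw [hidx, PySem.List.pyGet?_natCast, ht, hv2]
        rw [List.append_assoc, List.getElem?_append_right (le_refl _)]
        simp
      · rw [if_neg (by rw [hsz1]; exact hX)]
        exact ih (d1.insert j 1) (d2.insert j i) hk' (by omega)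

-- forward fold lookup = existing entry, else first occurrence in the remaining list
theorem get?_foldl_bStep (l : List (Int × Int)) (d : PySem.Dict Int Int) (k : Int) :
    (l.foldl bStep d).get? k = (d.get? k).or (firstOcc l k) := by
  induction l generalizing d with
  | nil => simp [firstOcc]
  | cons p rest ih =>
    simp only [List.foldl_cons, bStep]
    by_cases hc : d.contains p.2
    · simp only [hc, if_true, ih d]
      by_cases hk : p.2 = k
      · subst hk
        have : (d.get? p.2).isSome := by
          rw [← PySem.Dict.contains_eq_isSome_get?]; exact hc
        obtain ⟨v, hv⟩ := Option.isSome_iff_exists.mp this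
        simp [firstOcc, hv]
      · simp [firstOcc, show (p.2 == k) = false by simpa using hk]
    · simp only [hc, Bool.false_eq_true, if_false, ih]
      have hnone : d.get? p.2 = none := by
        cases hg : d.get? p.2 with
        | none => rfl
        | some v =>
          exact absurd (by rw [PySem.Dict.contains_eq_isSome_get?, hg]; rfl) hc
      by_cases hk : p.2 = k
      · subst hk
        simp [firstOcc, PySem.Dict.get?_insert_self, hnone]
      · rw [PySem.Dict.get?_insert_of_ne d p.1 (fun h => hk h.symm)]
        simp [firstOcc, show (p.2 == k) = false by simpa using hk]

-- reverse-overwrite fold lookup = first occurrence in the list, else existing entry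
theorem get?_foldl_revStep (l : List (Int × Int)) (d : PySem.Dict Int Int) (k : Int) :
    (l.reverse.foldl revStep d).get? k = (firstOcc l k).or (d.get? k) := by
  induction l generalizing d with
  | nil => simp [firstOcc]
  | cons p rest ih =>
    have : (p :: rest).reverse = rest.reverse ++ [p] := by simp
    rw [this, List.foldl_append]
    simp only [List.foldl_cons, List.foldl_nil, revStep]
    by_cases hk : p.2 = k
    · subst hk
      simp [PySem.Dict.get?_insert_self, firstOcc]
    · rw [PySem.Dict.get?_insert_of_ne _ p.1 (fun h => hk h.symm), ih]
      simp [firstOcc, show (p.2 == k) = false by simpa using hk]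

theorem nodup_keys_foldl_bStep (l : List (Int × Int)) (d : PySem.Dict Int Int)
    (h : d.keys.Nodup) : (l.foldl bStep d).keys.Nodup := by
  induction l generalizing d with
  | nil => exact h
  | cons p rest ih =>
    simp only [List.foldl_cons, bStep]
    by_cases hc : d.contains p.2
    · simp only [hc, if_true]; exact ih d h
    · simp only [hc, Bool.false_eq_true, if_false]
      apply ih
      rw [PySem.Dict.keys_insert_of_not_contains d p.1 (by simpa using hc)]
      refine List.Nodup.append h (List.nodup_singleton _) ?_
      intro a ha hb
      simp at hb; subst hb
      rw [PySem.Dict.contains_eq_decide_mem_keys] at hc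
      simp [ha] at hc

-- the forward dict's values are the first-occurrence indices in increasing order
theorem values_foldl_bStep_pairwise (A : List Int) :
    ∀ (n : Int) (d : PySem.Dict Int Int),
      d.values.Pairwise (· < ·) → (∀ v ∈ d.values, v < n) →
      ((PySem.List.enumerate A n).foldl bStep d).values.Pairwise (· < ·) := by
  induction A with
  | nil => intro n d hp _; simpa [PySem.List.enumerate] using hp
  | cons x xs ih =>
    intro n d hp hlt
    rw [PySem.List.enumerate_cons]
    simp only [List.foldl_cons, bStep]
    by_cases hc : d.contains x
    · simp only [hc, if_true]
      exact ih (n + 1) d hp (fun v hv => by have := hlt v hv; omega)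
    · simp only [hc, Bool.false_eq_true, if_false]
      have hv : (d.insert x n).values = d.values ++ [n] := by
        simp [PySem.Dict.values,
          PySem.Dict.items_insert_of_not_contains d n (by simpa using hc)]
      apply ih (n + 1)
      · rw [hv]
        refine List.pairwise_append.mpr ⟨hp, List.pairwise_singleton _ _, ?_⟩
        intro a ha b hb
        simp at hb; subst hb
        exact hlt a ha
      · intro v hvv
        rw [hv] at hvv
        rcases List.mem_append.mp hvv with h | h
        · have := hlt v h; omega
        · simp at h; omega

theorem sorted_rev_values_eq_forward (A : List Int) :
    PySem.List.sorted
        (((PySem.List.enumerate A 0).reverse.foldl revStep PySem.Dict.empty).values)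
        (fun x => x) false
      = ((PySem.List.enumerate A 0).foldl bStep PySem.Dict.empty).values := by
  set l := PySem.List.enumerate A 0 with hl
  set F := l.foldl bStep PySem.Dict.empty with hF
  set R := l.reverse.foldl revStep PySem.Dict.empty with hR
  have hget : ∀ k, R.get? k = F.get? k := by
    intro k
    rw [hR, hF, get?_foldl_revStep, get?_foldl_bStep]
    simp [PySem.Dict.get?_empty]
  have hFn : F.keys.Nodup := nodup_keys_foldl_bStep l _ (by simp)
  have hRn : R.keys.Nodup :=
    PySem.Dict.nodup_keys_foldl_insert_key l.reverse Prod.snd (fun _ p => p.1)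
      PySem.Dict.empty (by simp)
  have hmem : ∀ k, k ∈ R.keys ↔ k ∈ F.keys := by
    intro k
    have h1 : (k ∈ R.keys) ↔ R.contains k = true := (PySem.Dict.contains_iff_mem_keys _ _).symm
    have h2 : (k ∈ F.keys) ↔ F.contains k = true := (PySem.Dict.contains_iff_mem_keys _ _).symm
    rw [h1, h2, PySem.Dict.contains_eq_isSome_get?, PySem.Dict.contains_eq_isSome_get?, hget k]
  have hkp : R.keys.Perm F.keys := (List.perm_ext_iff_of_nodup hRn hFn).mpr hmem
  have hRv : R.values = R.keys.map (fun k => R.getD k 0) := PySem.Dict.values_eq_map_keys R hRn 0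
  have hFv : F.values = F.keys.map (fun k => F.getD k 0) := PySem.Dict.values_eq_map_keys F hFn 0
  have hperm : F.values.Perm R.values := by
    rw [hRv, hFv]
    have : F.keys.map (fun k => F.getD k 0) = F.keys.map (fun k => R.getD k 0) := by
      apply List.map_congr_left
      intro k _
      rw [PySem.Dict.getD_eq_get?_getD, PySem.Dict.getD_eq_get?_getD, hget k]
    rw [this]
    exact (hkp.map (fun k => R.getD k 0)).symm
  have hpw : F.values.Pairwise (· < ·) :=
    values_foldl_bStep_pairwise A 0 PySem.Dict.empty
      (by simp [PySem.Dict.empty, PySem.Dict.values])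
      (by simp [PySem.Dict.empty, PySem.Dict.values])
  exact PySem.List.sorted_eq_of_perm_of_pairwise_lt _ _ _ hperm hpw

-- ===== VERDICT (by name: the statement is the Claim_ definition above) =====
theorem solution_spec : Claim_equal_solution := by
  intro X A _
  unfold Spec_solution solution solution_alt
  show solGoA X (PySem.List.enumerate A 0) PySem.Dict.empty =
    (if 1 ≤ X ∧ X ≤ ((PySem.List.sorted ((PySem.List.enumerate A 0).reverse.foldl revStep PySem.Dict.empty).values (fun x => x) false).length : Int)
     then (PySem.List.pyGet? (PySem.List.sorted ((PySem.List.enumerate A 0).reverse.foldl revStep PySem.Dict.empty).values (fun x => x) false) (X - 1)).getD (-1)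
     else -1)
  rw [sorted_rev_values_eq_forward A]
  by_cases hX : 1 ≤ X
  · have h := solGoA_main X (PySem.List.enumerate A 0) PySem.Dict.empty PySem.Dict.empty rfl
      (by simp [PySem.Dict.size_empty]; omega)
    rw [h]
    by_cases hle : X ≤ ((((PySem.List.enumerate A 0).foldl bStep PySem.Dict.empty).values.length : Nat) : Int)
    · rw [if_pos hle, if_pos ⟨hX, hle⟩]
    · rw [if_neg hle, if_neg (by tauto)]
  · rw [solGoA_neg X (by omega) _ _ (Or.inr rfl)]
    rw [if_neg (by intro h; exact hX h.1)]
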